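-- pv_equiv track=rewrite | github.com/AngelaHdR/Scrabble | Mots jouables.py | mot_jouable
-- ===== SOURCE A (Python) =====
-- def mot_jouable(mot,ll):           #Vérifie si le mot joué contient les lettre de la main
--
--     lettres_restantes = list(ll)
--
--     for ll in mot:
--         if ll in lettres_restantes:
--             lettres_restantes.remove(ll)
--         else:
--             return False
--     return True
-- ===== SOURCE B (Python) =====
-- def mot_jouable(mot, ll):
--     # Build a frequency table of the word once, then compare against hand counts.
--     need = {}
--     for c in mot:
--         need[c] = need.get(c, 0) + 1
--     return all(ll.count(c) >= n for c, n in need.items())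
-- ===== Notes on version B (the rewrite author's own statement) =====
-- stated objective: faster
-- what changed: Replaces A's per-letter scan-and-remove loop over a mutable copy of the hand with a frequency table of the word built once and compared against per-letter counts of the hand.
import Mathlib
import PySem

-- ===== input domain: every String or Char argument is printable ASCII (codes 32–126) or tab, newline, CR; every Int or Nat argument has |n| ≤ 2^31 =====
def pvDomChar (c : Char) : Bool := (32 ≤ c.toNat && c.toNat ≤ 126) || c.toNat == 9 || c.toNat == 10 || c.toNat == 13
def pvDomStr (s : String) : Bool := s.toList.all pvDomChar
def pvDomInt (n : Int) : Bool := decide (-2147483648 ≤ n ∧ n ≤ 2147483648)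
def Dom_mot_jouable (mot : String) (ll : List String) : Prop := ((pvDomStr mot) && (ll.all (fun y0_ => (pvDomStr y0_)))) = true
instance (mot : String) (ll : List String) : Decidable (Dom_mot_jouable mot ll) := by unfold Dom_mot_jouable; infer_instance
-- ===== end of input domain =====

-- B builds a frequency table of the word once and compares counts, instead of A's scan-and-remove loop; objective: alternative.
-- ===== PORT A =====
-- the 'for ll in mot' loop: try to remove each letter from the remaining hand, else return False
def motJouableLoop : List Char → List String → Bool
  | [], _ => true
  | c :: cs, rest =>
    if (String.singleton c) ∈ rest then
      motJouableLoop cs ((PySem.List.remove? rest (String.singleton c)).getD rest)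
    else false

def mot_jouable (mot : String) (ll : List String) : Bool :=
  motJouableLoop mot.toList ll

-- ===== PORT B =====
def mot_jouable_alt (mot : String) (ll : List String) : Bool :=
  -- need = the frequency table of mot; all(ll.count(c) >= n for c, n in need.items())
  (mot.toList.foldl (fun d c => d.insert c (d.getD c 0 + 1)) PySem.Dict.empty).items.all
    (fun p => decide ((PySem.List.count ll (String.singleton p.1) : Int) ≥ p.2))

-- ===== PRECONDITION & SPEC =====
def Spec_mot_jouable (mot : String) (ll : List String) (out : Bool) : Prop := out = mot_jouable_alt mot ll
instance (mot : String) (ll : List String) (out : Bool) : Decidable (Spec_mot_jouable mot ll out) := by unfold Spec_mot_jouable; infer_instance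

-- ===== CLAIM (what is proved, stated in full; the proofs are below) =====
def Claim_equal_mot_jouable : Prop := ∀ (mot : String) (ll : List String), Dom_mot_jouable mot ll → Spec_mot_jouable mot ll (mot_jouable mot ll)

-- ===== LEMMAS AND PROOFS =====



lemma singleton_inj {a b : Char} (h : String.singleton a = String.singleton b) : a = b := by
  have : (String.singleton a).toList = (String.singleton b).toList := by rw [h]
  simpa [String.singleton] using this

lemma motJouableLoop_iff (cs : List Char) (rest : List String) :
    motJouableLoop cs rest = true ↔
      ∀ c : Char, cs.count c ≤ rest.count (String.singleton c) := by
  induction cs generalizing rest with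
  | nil => simp [motJouableLoop]
  | cons c cs ih =>
    by_cases hmem : (String.singleton c) ∈ rest
    · rw [motJouableLoop, if_pos hmem, PySem.List.remove?_eq_some_erase rest (String.singleton c) hmem]
      simp only [Option.getD_some]
      rw [ih]
      have hcnt := List.count_pos_iff.mpr hmem
      constructor
      · intro h d
        have hd := h d
        simp only [List.count_erase, List.count_cons] at hd ⊢
        by_cases hdc : d = c
        · subst hdc; simp at hd ⊢; omega
        · have hcd : ¬ (c = d) := fun h' => hdc h'.symm
          have hne : ¬ (String.singleton c = String.singleton d) := fun h' => hdc (singleton_inj h').symm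
          simp [hcd, hne] at hd ⊢; omega
      · intro h d
        have hd := h d
        simp only [List.count_erase, List.count_cons] at hd ⊢
        by_cases hdc : d = c
        · subst hdc; simp at hd ⊢; omega
        · have hcd : ¬ (c = d) := fun h' => hdc h'.symm
          have hne : ¬ (String.singleton c = String.singleton d) := fun h' => hdc (singleton_inj h').symm
          simp [hcd, hne] at hd ⊢; omega
    · rw [motJouableLoop, if_neg hmem]
      simp only [Bool.false_eq_true, false_iff, not_forall]
      refine ⟨c, ?_⟩
      rw [List.count_cons_self, List.count_eq_zero_of_not_mem hmem]
      omega

lemma alt_iff (mot : String) (ll : List String) :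
    mot_jouable_alt mot ll = true ↔
      ∀ c : Char, mot.toList.count c ≤ ll.count (String.singleton c) := by
  unfold mot_jouable_alt
  rw [PySem.Dict.foldl_insert_getD_add_one_eq_counter, PySem.Dict.items_counter]
  rw [List.all_eq_true]
  constructor
  · intro h c
    by_cases hc : c ∈ PySem.Set.ofList mot.toList
    · have := h (c, (mot.toList.count c : Int)) (List.mem_map.mpr ⟨c, hc, rfl⟩)
      simp only [decide_eq_true_eq, ge_iff_le] at this
      exact_mod_cast this
    · have : c ∉ mot.toList := fun h' => hc (by
        rw [PySem.Set.mem_ofList]; exact h')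
      rw [List.count_eq_zero_of_not_mem this]
      omega
  · intro h p hp
    rcases List.mem_map.mp hp with ⟨c, _, rfl⟩
    simp only [decide_eq_true_eq, ge_iff_le]
    exact_mod_cast h c

-- ===== VERDICT (by name: the statement is the Claim_ definition above) =====
theorem mot_jouable_spec : Claim_equal_mot_jouable := by
  intro mot ll _
  unfold Spec_mot_jouable
  rw [Bool.eq_iff_iff]
  rw [show mot_jouable mot ll = motJouableLoop mot.toList ll from rfl]
  rw [motJouableLoop_iff, alt_iff]
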